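-- pv_equiv track=rewrite | github.com/QingXuan2000/qingxuan2000.github.io | .github/scripts/check_issue.py | _update_tag_dict
-- ===== SOURCE A (Python) =====
-- def _update_tag_dict(existing_dict: dict, tag_updates: dict) -> dict:
--     new_dict = existing_dict.copy()
--     for tag, num in tag_updates.items():
--         if num > 0:
--             new_dict[tag] = str(num)
--         elif tag in new_dict:
--             del new_dict[tag]
--     return new_dict
-- ===== SOURCE B (Python) =====
-- def _update_tag_dict(existing_dict: dict, tag_updates: dict) -> dict:
--     # Build the result directly in its final order: classify each existing entry
--     # against the updates (re-string, drop, or keep), then append brand-new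
--     # positive tags; no copy, no in-place mutation, no deletes.
--     updates = dict(tag_updates)
--     pairs = []
--     for tag, val in existing_dict.items():
--         if tag in updates:
--             num = updates[tag]
--             if num > 0:
--                 pairs.append((tag, str(num)))
--         else:
--             pairs.append((tag, val))
--     for tag, num in tag_updates.items():
--         if num > 0 and tag not in existing_dict:
--             pairs.append((tag, str(num)))
--     return dict(pairs)
-- ===== Notes on version B (the rewrite author's own statement) =====
-- stated objective: alternative
-- what changed: A copies existing_dict and mutates the copy in one loop over tag_updates (insert or delete per entry); B never mutates a dict: it emits the result pairs in final output order by classifying each existing entry against a lookup of the updates (re-string positive, drop non-positive, keep untouched) and then appending the brand-new positive tags, finally wrapping the pair list with dict().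
import Mathlib
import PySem

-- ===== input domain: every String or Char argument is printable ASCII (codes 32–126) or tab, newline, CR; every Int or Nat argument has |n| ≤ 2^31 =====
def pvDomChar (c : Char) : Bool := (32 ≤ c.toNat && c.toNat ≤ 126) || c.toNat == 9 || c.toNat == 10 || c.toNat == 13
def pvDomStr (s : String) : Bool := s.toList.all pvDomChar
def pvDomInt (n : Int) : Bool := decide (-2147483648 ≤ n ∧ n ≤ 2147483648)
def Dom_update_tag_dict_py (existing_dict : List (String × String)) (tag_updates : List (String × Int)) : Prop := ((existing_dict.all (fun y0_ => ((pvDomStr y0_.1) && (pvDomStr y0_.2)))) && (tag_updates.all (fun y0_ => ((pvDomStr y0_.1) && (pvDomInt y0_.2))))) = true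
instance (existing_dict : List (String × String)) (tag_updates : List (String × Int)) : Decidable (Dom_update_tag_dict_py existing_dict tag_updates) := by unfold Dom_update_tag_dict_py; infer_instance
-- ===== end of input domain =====

-- B replaces A's copy-then-mutate loop by a mutation-free construction: it emits the result
-- pairs directly in final output order (classify each existing entry against the updates, then
-- append the brand-new positive tags) and wraps them with dict(); same cost, different strategy.

-- ===== PORT A =====
-- literal transliteration of A: new_dict = copy of existing_dict, then one loop over
-- tag_updates that inserts str(num) for positive num and deletes the tag otherwise if present
def update_tag_dict_py (existing_dict : List (String × String)) (tag_updates : List (String × Int)) : List (String × String) :=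
  (tag_updates.foldl
    (fun d p =>
      if p.2 > 0 then d.insert p.1 (PySem.Int.toStr p.2)
      else if d.contains p.1 then d.erase p.1 else d)
    (PySem.Dict.mk existing_dict)).items

-- ===== PORT B =====
-- literal transliteration of B (Source B): updates = dict(tag_updates); first loop classifies each
-- existing entry (re-string positive, drop non-positive, keep absent ones unchanged); second
-- loop appends positive tags not already in existing_dict; return dict(pairs)
def update_tag_dict_py_alt (existing_dict : List (String × String)) (tag_updates : List (String × Int)) : List (String × String) :=
  let updates : PySem.Dict String Int := PySem.Dict.ofList tag_updates
  let pairs1 : List (String × String) :=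
    existing_dict.foldl
      (fun acc kv =>
        if updates.contains kv.1 then
          if updates.getD kv.1 0 > 0 then acc ++ [(kv.1, PySem.Int.toStr (updates.getD kv.1 0))]
          else acc
        else acc ++ [kv])
      []
  let pairs : List (String × String) :=
    tag_updates.foldl
      (fun acc p =>
        if p.2 > 0 && !((PySem.Dict.mk existing_dict).contains p.1) then
          acc ++ [(p.1, PySem.Int.toStr p.2)]
        else acc)
      pairs1
  (PySem.Dict.ofList pairs).items

-- ===== PRECONDITION & SPEC =====
-- Pre_ excludes association lists with a duplicate key (in either argument): such lists never
-- arise from the Python dict arguments (dict literals collapse duplicates), and on them the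
-- list-level merge order is accidental.
def Pre_update_tag_dict_py (existing_dict : List (String × String)) (tag_updates : List (String × Int)) : Prop :=
  (existing_dict.map Prod.fst).Nodup ∧ (tag_updates.map Prod.fst).Nodup
instance (existing_dict : List (String × String)) (tag_updates : List (String × Int)) : Decidable (Pre_update_tag_dict_py existing_dict tag_updates) := by unfold Pre_update_tag_dict_py; infer_instance

def pvWitness_update_tag_dict_py : (List (String × String)) × (List (String × Int)) :=
  ([("a", "1"), ("b", "2")], [("b", 3), ("c", 0)])

def Spec_update_tag_dict_py (existing_dict : List (String × String)) (tag_updates : List (String × Int)) (out : List (String × String)) : Prop := out = update_tag_dict_py_alt existing_dict tag_updates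
instance (existing_dict : List (String × String)) (tag_updates : List (String × Int)) (out : List (String × String)) : Decidable (Spec_update_tag_dict_py existing_dict tag_updates out) := by unfold Spec_update_tag_dict_py; infer_instance

-- ===== CLAIM (what is proved, stated in full; the proofs are below) =====
def Claim_equal_update_tag_dict_py : Prop := ∀ (existing_dict : List (String × String)) (tag_updates : List (String × Int)), Dom_update_tag_dict_py existing_dict tag_updates → Pre_update_tag_dict_py existing_dict tag_updates → Spec_update_tag_dict_py existing_dict tag_updates (update_tag_dict_py existing_dict tag_updates)

-- ===== LEMMAS AND PROOFS =====

-- the tags tag_updates deletes (num ≤ 0), in order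
def pvDels (tu : List (String × Int)) : List String :=
  tu.filterMap (fun p => if p.2 ≤ 0 then some p.1 else none)

-- the (tag, str(num)) pairs tag_updates inserts (num > 0), in order
def pvPos (tu : List (String × Int)) : List (String × String) :=
  tu.filterMap (fun p => if p.2 > 0 then some (p.1, PySem.Int.toStr p.2) else none)

-- replacement applied to an existing entry by the positive updates
def pvRepl (tu : List (String × Int)) (kv : String × String) : String × String :=
  match (pvPos tu).lookup kv.1 with
  | some v => (kv.1, v)
  | none => kv

-- lookup finds the stored value when keys are unique
lemma pvLookup_some (ps : List (String × String)) (k v : String)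
    (hn : (ps.map Prod.fst).Nodup) (hm : (k, v) ∈ ps) : ps.lookup k = some v := by
  induction ps with
  | nil => simp at hm
  | cons q ps ih =>
    obtain ⟨q1, q2⟩ := q
    simp only [List.map_cons, List.nodup_cons] at hn
    rcases List.mem_cons.mp hm with h | h
    · rw [show ((q1, q2) : String × String) = (k, v) from h.symm]
      simp [List.lookup]
    · have hne : (k == q1) = false := by
        simp only [beq_eq_false_iff_ne, ne_eq]
        intro he
        exact hn.1 (by rw [← he]; exact List.mem_map_of_mem h)
      simp only [List.lookup, hne]
      exact ih hn.2 h

lemma pvDels_sublist (tu : List (String × Int)) : (pvDels tu).Sublist (tu.map Prod.fst) := by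
  induction tu with
  | nil => simp [pvDels]
  | cons p rest ih =>
    by_cases hp : p.2 ≤ 0
    · simp only [pvDels, List.filterMap_cons, if_pos hp, List.map_cons]
      exact ih.cons₂ _
    · simp only [pvDels, List.filterMap_cons, if_neg hp, List.map_cons]
      exact ih.cons _

lemma pvPos_keys_sublist (tu : List (String × Int)) : ((pvPos tu).map Prod.fst).Sublist (tu.map Prod.fst) := by
  induction tu with
  | nil => simp [pvPos]
  | cons p rest ih =>
    by_cases hp : p.2 > 0
    · simp only [pvPos, List.filterMap_cons, if_pos hp, List.map_cons]
      exact ih.cons₂ _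
    · simp only [pvPos, List.filterMap_cons, if_neg hp, List.map_cons]
      exact ih.cons _

-- A's loop step on the deletion branch is a plain filter of the items
lemma pvStep_del (l : List (String × String)) (t : String) :
    ((if (PySem.Dict.mk l).contains t then (PySem.Dict.mk l).erase t else (PySem.Dict.mk l)) : PySem.Dict String String)
      = PySem.Dict.mk (l.filter (fun p => !(p.1 == t))) := by
  by_cases hc : (PySem.Dict.mk l).contains t = true
  · rw [if_pos hc]; rfl
  · rw [if_neg hc]
    have hself : l.filter (fun p => !(p.1 == t)) = l := by
      apply List.filter_eq_self.mpr
      intro p hp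
      simp only [PySem.Dict.contains_mk, Bool.not_eq_true, List.any_eq_false] at hc
      simp [hc p hp]
    conv_rhs => rw [hself]

-- A-side loop invariant: A's fold over tag_updates from any items list l equals
-- filter-by-deletions then dict.update with the positive pairs
lemma pvMain (tu : List (String × Int)) (htu : (tu.map Prod.fst).Nodup) (l : List (String × String)) :
    tu.foldl
      (fun d p =>
        if p.2 > 0 then d.insert p.1 (PySem.Int.toStr p.2)
        else if d.contains p.1 then d.erase p.1 else d)
      (PySem.Dict.mk l)
    = PySem.Dict.update (PySem.Dict.mk (l.filter (fun kv => !(decide (kv.1 ∈ pvDels tu))))) (pvPos tu) := by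
  induction tu generalizing l with
  | nil => simp [pvDels, pvPos, PySem.Dict.update]
  | cons p rest ih =>
    obtain ⟨t, n⟩ := p
    simp only [List.map_cons, List.nodup_cons] at htu
    obtain ⟨htn, hrest⟩ := htu
    have htd : t ∉ pvDels rest := fun h => htn ((pvDels_sublist rest).mem h)
    by_cases hn : n > 0
    · have hdels : pvDels ((t, n) :: rest) = pvDels rest := by
        simp [pvDels, if_neg (by omega : ¬ n ≤ 0)]
      have hpos : pvPos ((t, n) :: rest) = (t, PySem.Int.toStr n) :: pvPos rest := by
        simp [pvPos, hn]
      rw [List.foldl_cons]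
      simp only [hn, if_pos]
      rw [show ((PySem.Dict.mk l).insert t (PySem.Int.toStr n))
            = PySem.Dict.mk (if (PySem.Dict.mk l).contains t
                then l.map (fun q => if q.1 == t then (t, PySem.Int.toStr n) else q)
                else l ++ [(t, PySem.Int.toStr n)]) from by
        unfold PySem.Dict.insert; split <;> rfl]
      rw [ih hrest]
      rw [hdels, hpos]
      show _ = PySem.Dict.update
        (PySem.Dict.insert (PySem.Dict.mk (l.filter fun kv => !decide (kv.1 ∈ pvDels rest))) t (PySem.Int.toStr n))
        (pvPos rest)
      congr 1
      by_cases hc : (PySem.Dict.mk l).contains t = true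
      · rw [if_pos hc]
        have hc' : (PySem.Dict.mk (l.filter fun kv => !decide (kv.1 ∈ pvDels rest))).contains t = true := by
          simp only [PySem.Dict.contains_mk, List.any_eq_true] at hc ⊢
          obtain ⟨q, hq, hqt⟩ := hc
          refine ⟨q, List.mem_filter.mpr ⟨hq, ?_⟩, hqt⟩
          have : q.1 = t := by simpa using hqt
          simp [this, htd]
        unfold PySem.Dict.insert
        rw [if_pos hc']
        apply PySem.Dict.ext
        show (l.map _).filter _ = (_ : List _).map _
        rw [List.filter_map]
        congr 1
        apply List.filter_congr
        intro q hq
        by_cases hqt : q.1 = t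
        · simp [Function.comp, hqt, htd]
        · simp [Function.comp, (by simpa using hqt : ¬ (q.1 == t) = true)]
      · rw [if_neg hc]
        have hc' : (PySem.Dict.mk (l.filter fun kv => !decide (kv.1 ∈ pvDels rest))).contains t = false := by
          simp only [PySem.Dict.contains_mk, Bool.not_eq_true, List.any_eq_false] at hc
          simp only [PySem.Dict.contains_mk, List.any_eq_false]
          exact fun q hq => by simp [hc q (List.mem_filter.mp hq).1]
        unfold PySem.Dict.insert
        rw [if_neg (by simp [hc'])]
        apply PySem.Dict.ext
        show (l ++ [(t, PySem.Int.toStr n)]).filter _ = _ ++ _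
        rw [List.filter_append]
        congr 1
        simp [htd]
    · have hdels : pvDels ((t, n) :: rest) = t :: pvDels rest := by
        simp [pvDels, if_pos (by omega : n ≤ 0)]
      have hpos : pvPos ((t, n) :: rest) = pvPos rest := by
        simp [pvPos, hn]
      rw [List.foldl_cons]
      simp only [hn, if_false]
      rw [pvStep_del l t, ih hrest, hdels, hpos]
      congr 2
      rw [List.filter_filter]
      apply List.filter_congr
      intro q hq
      by_cases hqt : q.1 = t
      · simp [hqt, List.mem_cons]
      · simp [hqt, List.mem_cons, (by simpa using hqt : ¬ (q.1 == t) = true)]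

-- with nodup keys, dict(tag_updates) is just the literal dict of the list
lemma pvOfList_eq_mk (tu : List (String × Int)) (htu : (tu.map Prod.fst).Nodup) :
    PySem.Dict.ofList tu = PySem.Dict.mk tu := by
  apply PySem.Dict.ext
  show (List.foldl (fun acc p => acc.insert p.1 p.2) PySem.Dict.empty tu).items = tu
  rw [PySem.Dict.items_foldl_insert_fresh tu Prod.fst Prod.snd PySem.Dict.empty
      (fun a _ => PySem.Dict.contains_empty a.1) htu]
  simp [PySem.Dict.empty]

-- dict.update items, for nodup keys on both sides: replace-in-place ++ append-the-fresh
lemma pvUpdate_items (ps : List (String × String)) (hps : (ps.map Prod.fst).Nodup)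
    (d : PySem.Dict String String) :
    (d.update ps).items
      = d.items.map (fun kv => match ps.lookup kv.1 with | some v => (kv.1, v) | none => kv)
        ++ ps.filter (fun p => !(d.contains p.1)) := by
  induction ps generalizing d with
  | nil => simp [PySem.Dict.update]
  | cons q ps ih =>
    obtain ⟨k, v⟩ := q
    obtain ⟨l⟩ := d
    simp only [List.map_cons, List.nodup_cons] at hps
    obtain ⟨hk, hps⟩ := hps
    have hlk : ps.lookup k = none := by
      rw [List.lookup_eq_none_iff]
      intro p hp
      simp only [bne_iff_ne, ne_eq]
      intro h
      exact hk (by rw [h]; exact List.mem_map_of_mem hp)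
    show (PySem.Dict.update ((PySem.Dict.mk l).insert k v) ps).items = _
    rw [ih hps]
    by_cases hc : (PySem.Dict.mk l).contains k = true
    · rw [PySem.Dict.items_insert_of_contains _ _ hc]
      have hfc : List.filter (fun p => !((PySem.Dict.mk l).contains p.1)) ((k, v) :: ps)
          = List.filter (fun p => !((PySem.Dict.mk l).contains p.1)) ps := by
        rw [List.filter_cons]
        simp [hc]
      rw [hfc, List.map_map]
      congr 1
      · apply List.map_congr_left
        intro kv hkv
        by_cases hkvk : kv.1 = k
        · have hb : (kv.1 == k) = true := by simp [hkvk]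
          simp [Function.comp, hkvk, List.lookup, hlk]
        · have hb : (kv.1 == k) = false := by simpa using hkvk
          simp [Function.comp, hb, List.lookup]
      · apply List.filter_congr
        intro p hp
        have hpk : (p.1 == k) = false := by
          simp only [beq_eq_false_iff_ne, ne_eq]
          intro h
          exact hk (by rw [← h]; exact List.mem_map_of_mem hp)
        congr 1
        rw [PySem.Dict.contains_insert, hpk]
        simp
    · have hc' : (PySem.Dict.mk l).contains k = false := Bool.eq_false_iff.mpr hc
      rw [PySem.Dict.items_insert_of_not_contains _ _ hc']
      have hfc : List.filter (fun p => !((PySem.Dict.mk l).contains p.1)) ((k, v) :: ps)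
          = (k, v) :: List.filter (fun p => !((PySem.Dict.mk l).contains p.1)) ps := by
        rw [List.filter_cons]
        simp [hc']
      rw [hfc, List.map_append]
      have h1 : List.map (fun kv => match ps.lookup kv.1 with | some w => (kv.1, w) | none => kv) [(k, v)]
          = [(k, v)] := by simp [hlk]
      rw [h1, List.append_assoc]
      congr 1
      · apply List.map_congr_left
        intro kv hkv
        have hb : (kv.1 == k) = false := by
          simp only [beq_eq_false_iff_ne, ne_eq]
          intro h
          have hct : (PySem.Dict.mk l).contains k = true := by
            simp only [PySem.Dict.contains_mk, List.any_eq_true]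
            exact ⟨kv, hkv, by simp [h]⟩
          rw [hct] at hc'
          cases hc'
        simp [List.lookup, hb]
      · show (k, v) :: _ = (k, v) :: _
        congr 1
        apply List.filter_congr
        intro p hp
        have hpk : (p.1 == k) = false := by
          simp only [beq_eq_false_iff_ne, ne_eq]
          intro h
          exact hk (by rw [← h]; exact List.mem_map_of_mem hp)
        congr 1
        rw [PySem.Dict.contains_insert, hpk]
        simp

-- B's first loop emits exactly the filtered existing entries with positive updates substituted
lemma pvPairs1 (tu : List (String × Int)) (htu : (tu.map Prod.fst).Nodup)
    (ex : List (String × String)) (acc : List (String × String)) :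
    ex.foldl
      (fun acc kv =>
        if (PySem.Dict.ofList tu).contains kv.1 then
          if (PySem.Dict.ofList tu).getD kv.1 0 > 0 then
            acc ++ [(kv.1, PySem.Int.toStr ((PySem.Dict.ofList tu).getD kv.1 0))]
          else acc
        else acc ++ [kv])
      acc
    = acc ++ (ex.filter (fun kv => !(decide (kv.1 ∈ pvDels tu)))).map (pvRepl tu) := by
  rw [pvOfList_eq_mk tu htu]
  induction ex generalizing acc with
  | nil => simp
  | cons kv ex ih =>
    rw [List.foldl_cons, List.filter_cons]
    by_cases hc : (PySem.Dict.mk tu).contains kv.1 = true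
    · have hex : ∃ n, (kv.1, n) ∈ tu := by
        simp only [PySem.Dict.contains_mk, List.any_eq_true] at hc
        obtain ⟨q, hq, hqt⟩ := hc
        have hq1 : q.1 = kv.1 := by simpa using hqt
        exact ⟨q.2, by rw [← hq1]; simpa using hq⟩
      obtain ⟨n, hn⟩ := hex
      have hget : (PySem.Dict.mk tu).getD kv.1 0 = n :=
        PySem.Dict.getD_of_mem_items (PySem.Dict.mk tu) hn htu 0
      rw [if_pos hc, hget]
      by_cases hp : n > 0
      · have hdel : kv.1 ∉ pvDels tu := by
          intro hmem
          simp only [pvDels, List.mem_filterMap] at hmem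
          obtain ⟨q, hq, hqe⟩ := hmem
          by_cases hq0 : q.2 ≤ 0
          · simp only [if_pos hq0, Option.some_inj] at hqe
            have heq : ((kv.1, n) : String × Int) = q :=
              List.inj_on_of_nodup_map htu hn hq (by simp [hqe])
            rw [← heq] at hq0
            omega
          · simp [if_neg hq0] at hqe
        have hlook : (pvPos tu).lookup kv.1 = some (PySem.Int.toStr n) := by
          apply pvLookup_some _ _ _ ((pvPos_keys_sublist tu).nodup htu)
          simp only [pvPos, List.mem_filterMap]
          exact ⟨(kv.1, n), hn, by simp [hp]⟩
        rw [if_pos hp, if_pos (by simp [hdel]), ih]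
        simp [pvRepl, hlook]
      · have hdel : kv.1 ∈ pvDels tu := by
          simp only [pvDels, List.mem_filterMap]
          exact ⟨(kv.1, n), hn, by simp [show n ≤ 0 by omega]⟩
        rw [if_neg hp, if_neg (by simp [hdel]), ih]
    · have hc' : (PySem.Dict.mk tu).contains kv.1 = false := Bool.eq_false_iff.mpr hc
      have hmem : kv.1 ∉ tu.map Prod.fst := by
        intro hmem
        obtain ⟨q, hq, hqe⟩ := List.mem_map.mp hmem
        have : (PySem.Dict.mk tu).contains kv.1 = true := by
          simp only [PySem.Dict.contains_mk, List.any_eq_true]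
          exact ⟨q, hq, by simp [hqe]⟩
        rw [this] at hc'
        cases hc'
      have hdel : kv.1 ∉ pvDels tu := fun h => hmem ((pvDels_sublist tu).mem h)
      have hlook : (pvPos tu).lookup kv.1 = none := by
        rw [List.lookup_eq_none_iff]
        intro p hp
        simp only [bne_iff_ne, ne_eq]
        intro h
        exact hmem ((pvPos_keys_sublist tu).mem (by rw [h]; exact List.mem_map_of_mem hp))
      rw [if_neg hc, if_pos (by simp [hdel]), ih]
      simp [pvRepl, hlook]

-- B's second loop appends the positive pairs whose tag is not in existing_dict
lemma pvPairs2 (ex : List (String × String)) (tu : List (String × Int)) (acc : List (String × String)) :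
    tu.foldl
      (fun acc p =>
        if p.2 > 0 && !((PySem.Dict.mk ex).contains p.1) then
          acc ++ [(p.1, PySem.Int.toStr p.2)]
        else acc)
      acc
    = acc ++ (pvPos tu).filter (fun p => !((PySem.Dict.mk ex).contains p.1)) := by
  induction tu generalizing acc with
  | nil => simp [pvPos]
  | cons p tu ih =>
    rw [List.foldl_cons]
    by_cases hp : p.2 > 0
    · have hpos : pvPos (p :: tu) = (p.1, PySem.Int.toStr p.2) :: pvPos tu := by
        simp [pvPos, hp]
      rw [hpos, List.filter_cons]
      by_cases hc : (PySem.Dict.mk ex).contains p.1 = true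
      · rw [if_neg (by rw [hc]; simp), ih, if_neg (by rw [hc]; simp)]
      · have hc' : (PySem.Dict.mk ex).contains p.1 = false := Bool.eq_false_iff.mpr hc
        rw [if_pos (by rw [hc']; simp [hp]), ih, if_pos (by rw [hc']; simp)]
        simp
    · have hpos : pvPos (p :: tu) = pvPos tu := by simp [pvPos, hp]
      rw [if_neg (by simp [hp]), ih, hpos]

-- membership of a non-deleted tag survives the deletion filter
lemma pvContains_filter (ex : List (String × String)) (dels : List String) (k : String) (hk : k ∉ dels) :
    (PySem.Dict.mk (ex.filter (fun kv => !(decide (kv.1 ∈ dels))))).contains k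
      = (PySem.Dict.mk ex).contains k := by
  simp only [PySem.Dict.contains_mk]
  induction ex with
  | nil => simp
  | cons kv ex ih =>
    rw [List.filter_cons]
    by_cases hkv : kv.1 ∈ dels
    · have hne : (kv.1 == k) = false := by
        simp only [beq_eq_false_iff_ne, ne_eq]
        intro h; exact hk (h ▸ hkv)
      rw [if_neg (by simp [hkv])]
      simp [hne, ih]
    · rw [if_pos (by simp [hkv])]
      simp [ih]

-- ===== VERDICT (by name: the statement is the Claim_ definition above) =====
theorem update_tag_dict_py_spec : Claim_equal_update_tag_dict_py := by
  intro ex tu _hdom hpre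
  obtain ⟨hex, htu⟩ := hpre
  unfold Spec_update_tag_dict_py update_tag_dict_py update_tag_dict_py_alt
  rw [pvMain tu htu ex]
  simp only []
  rw [pvPairs1 tu htu ex [], pvPairs2 ex tu _, List.nil_append]
  -- name the two halves of B's pair list
  set E := ex.filter (fun kv => !(decide (kv.1 ∈ pvDels tu))) with hE
  set P1 := E.map (pvRepl tu) with hP1
  set P2 := (pvPos tu).filter (fun p => !((PySem.Dict.mk ex).contains p.1)) with hP2
  -- A's side: items of (mk E).update (pvPos tu)
  rw [pvUpdate_items (pvPos tu) ((pvPos_keys_sublist tu).nodup htu) (PySem.Dict.mk E)]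
  -- B's side: dict(P1 ++ P2) has nodup keys, so its items are P1 ++ P2
  have hEkeys : (E.map Prod.fst).Nodup := ((List.filter_sublist).map Prod.fst).nodup hex
  have hP1keys : P1.map Prod.fst = E.map Prod.fst := by
    rw [hP1, List.map_map]
    apply List.map_congr_left
    intro kv _
    simp only [Function.comp, pvRepl]
    cases (pvPos tu).lookup kv.1 <;> rfl
  have hP2keys : (P2.map Prod.fst).Nodup :=
    ((List.filter_sublist).map Prod.fst).nodup ((pvPos_keys_sublist tu).nodup htu)
  have hdisj : ∀ k ∈ P1.map Prod.fst, k ∉ P2.map Prod.fst := by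
    intro k hk1 hk2
    rw [hP1keys] at hk1
    obtain ⟨kv, hkv, hkve⟩ := List.mem_map.mp hk1
    obtain ⟨p, hp, hpe⟩ := List.mem_map.mp hk2
    have hpc : ((PySem.Dict.mk ex).contains p.1) = false := by
      have := (List.mem_filter.mp hp).2
      simpa using this
    have : (PySem.Dict.mk ex).contains p.1 = true := by
      simp only [PySem.Dict.contains_mk, List.any_eq_true]
      exact ⟨kv, (List.mem_filter.mp hkv).1, by simp [hkve, hpe]⟩
    simp [this] at hpc
  have hkeys : ((P1 ++ P2).map Prod.fst).Nodup := by
    rw [List.map_append]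
    refine List.Nodup.append ?_ hP2keys ?_
    · rw [hP1keys]; exact hEkeys
    · exact List.disjoint_left.mpr hdisj
  have hBitems : (PySem.Dict.ofList (P1 ++ P2)).items = P1 ++ P2 := by
    show (List.foldl (fun acc p => acc.insert p.1 p.2) PySem.Dict.empty (P1 ++ P2)).items = _
    rw [PySem.Dict.items_foldl_insert_fresh (P1 ++ P2) Prod.fst Prod.snd PySem.Dict.empty
        (fun a _ => PySem.Dict.contains_empty a.1) hkeys]
    simp [PySem.Dict.empty]
  rw [hBitems]
  have hflt : List.filter (fun p => !((PySem.Dict.mk E).contains p.1)) (pvPos tu) = P2 := by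
    rw [hP2]
    apply List.filter_congr
    intro p hp
    have hpd : p.1 ∉ pvDels tu := by
      intro hmem
      simp only [pvDels, List.mem_filterMap] at hmem
      obtain ⟨q, hq, hqe⟩ := hmem
      by_cases hq0 : q.2 ≤ 0
      · simp only [if_pos hq0, Option.some_inj] at hqe
        simp only [pvPos, List.mem_filterMap] at hp
        obtain ⟨r, hr, hre⟩ := hp
        by_cases hr0 : r.2 > 0
        · simp only [if_pos hr0, Option.some_inj] at hre
          have hkeq : r.1 = q.1 := by rw [hqe, ← hre]
          have heq : r = q := List.inj_on_of_nodup_map htu hr hq (by simpa using hkeq)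
          rw [heq] at hr0
          omega
        · simp [if_neg hr0] at hre
      · simp [if_neg hq0] at hqe
    rw [hE, pvContains_filter ex (pvDels tu) p.1 hpd]
  rw [hflt]
  rfl
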